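-- pv_equiv track=rewrite | github.com/andreyaW/PhD_Sims | Prop_Sims/markovChain.py | define_state_space
-- ===== SOURCE A (Python) =====
-- def define_state_space(N):
--     vals = ["working", "failed"]
--     if N> 2:
--         for i in range(N-2):
--             vals.insert(-1,"partially working (" + str(i+1) + ")")
--     keys = [i for i in range(N)]
--     state_space = dict(zip(keys, vals))
--
--     return state_space
-- ===== SOURCE B (Python) =====
-- def define_state_space(N):
--     state_space = {}
--     for i in range(N):
--         if i == 0:
--             name = "working"
--         elif i == N - 1:
--             name = "failed"
--         else:
--             name = "partially working (" + str(i) + ")"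
--         state_space[i] = name
--     return state_space
-- ===== Notes on version B (the rewrite author's own statement) =====
-- stated objective: simpler
-- what changed: Replaces A's two-phase construction (grow a values list by repeated insert(-1) then zip it with the keys) with a single pass over range(N) that classifies each index positionally and assigns it into the dict directly.
import Mathlib
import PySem

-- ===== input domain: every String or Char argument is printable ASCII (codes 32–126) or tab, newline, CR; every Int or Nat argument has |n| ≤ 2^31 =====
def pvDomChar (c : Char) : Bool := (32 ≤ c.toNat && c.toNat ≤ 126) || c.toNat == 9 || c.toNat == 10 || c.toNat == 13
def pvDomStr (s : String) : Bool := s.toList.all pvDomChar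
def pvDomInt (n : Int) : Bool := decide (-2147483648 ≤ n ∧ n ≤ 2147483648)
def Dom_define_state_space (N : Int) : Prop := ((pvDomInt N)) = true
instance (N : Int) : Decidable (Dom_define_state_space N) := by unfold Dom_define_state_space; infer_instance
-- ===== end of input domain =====

-- B builds the dict in one direct positional pass over range(N) instead of A's
-- insert(-1)-grown values list zipped with the keys; objective: simpler.

-- ===== PORT A =====
def define_state_space (N : Int) : List (Int × String) :=
  let vals : List String := ["working", "failed"]
  let vals :=
    if N > 2 then
      (PySem.List.pyRange 0 (N - 2) 1).foldl
        (fun vs i =>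
          PySem.List.insert vs (-1) ("partially working (" ++ PySem.Int.toStr (i + 1) ++ ")"))
        vals
    else vals
  let keys := PySem.List.pyRange 0 N 1
  (PySem.Dict.ofList (keys.zip vals)).items

-- ===== PORT B =====
def define_state_space_alt (N : Int) : List (Int × String) :=
  ((PySem.List.pyRange 0 N 1).foldl
    (fun d i =>
      d.insert i
        (if i == 0 then "working"
         else if i == N - 1 then "failed"
         else "partially working (" ++ PySem.Int.toStr i ++ ")"))
    PySem.Dict.empty).items

-- ===== PRECONDITION & SPEC =====
def Spec_define_state_space (N : Int) (out : List (Int × String)) : Prop := out = define_state_space_alt N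
instance (N : Int) (out : List (Int × String)) : Decidable (Spec_define_state_space N out) := by unfold Spec_define_state_space; infer_instance

-- ===== CLAIM (what is proved, stated in full; the proofs are below) =====
def Claim_equal_define_state_space : Prop := ∀ (N : Int), Dom_define_state_space N → Spec_define_state_space N (define_state_space N)

-- ===== LEMMAS AND PROOFS =====

/-- The middle-state label. -/
def pvMid (i : Int) : String := "partially working (" ++ PySem.Int.toStr i ++ ")"

/-- B's per-index classification. -/
def pvName (N i : Int) : String :=
  if i == 0 then "working"
  else if i == N - 1 then "failed"
  else pvMid i

lemma ins_neg_one {α : Type} (ws : List α) (y v : α) :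
    PySem.List.insert (ws ++ [y]) (-1) v = ws ++ [v, y] := by
  simp [PySem.List.insert, PySem.List.sliceIndices]

/-- A's values list after the insert(-1) loop. -/
lemma foldl_ins (n : Nat) :
    (PySem.List.pyRange 0 (n : Int) 1).foldl
      (fun vs i => PySem.List.insert vs (-1) (pvMid (i + 1))) ["working", "failed"]
    = "working" :: ((PySem.List.pyRange 0 (n : Int) 1).map (fun k => pvMid (k + 1))) ++ ["failed"] := by
  induction n with
  | zero => simp [PySem.List.pyRange_one_eq_nil]
  | succ n ih =>
    rw [show ((n + 1 : Nat) : Int) = (n : Int) + 1 by push_cast; ring,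
       PySem.List.pyRange_one_succ_right (by positivity)]
    rw [List.foldl_append, List.map_append, ih, List.foldl_cons, List.foldl_nil,
       ← List.cons_append, ins_neg_one]
    simp

/-- A's finished values list is exactly B's classification, index by index. -/
lemma vals_eq_map_name (N : Int) (h : 2 < N) :
    "working" :: ((PySem.List.pyRange 0 (((N - 2).toNat : Nat) : Int) 1).map (fun k => pvMid (k + 1))) ++ ["failed"]
    = (PySem.List.pyRange 0 N 1).map (pvName N) := by
  rw [show (((N - 2).toNat : Nat) : Int) = N - 2 by omega]
  rw [PySem.List.pyRange_one_append 0 1 N (by omega) (by omega),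
     PySem.List.pyRange_one_append 1 (N - 1) N (by omega) (by omega)]
  have e1 : PySem.List.pyRange 0 1 1 = [0] := by decide
  have e2 : PySem.List.pyRange (N - 1) N 1 = [N - 1] := by
    have h2 := PySem.List.pyRange_one_singleton (N - 1)
    rwa [show (N - 1) + 1 = N by ring] at h2
  rw [e1, e2]
  have hmid : (PySem.List.pyRange 1 (N - 1) 1).map (pvName N)
      = (PySem.List.pyRange 1 (N - 1) 1).map pvMid := by
    refine List.map_congr_left fun x hx => ?_
    rw [PySem.List.mem_pyRange_one] at hx
    simp only [pvName]
    rw [if_neg (by simp; omega), if_neg (by simp; omega)]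
  have hshift : (PySem.List.pyRange 0 (N - 2) 1).map (fun k => pvMid (k + 1))
      = (PySem.List.pyRange 1 (N - 1) 1).map pvMid := by
    rw [PySem.List.pyRange_one, PySem.List.pyRange_one,
       show (N - 2 - 0).toNat = (N - 1 - 1).toNat by omega]
    simp only [List.map_map]
    refine List.map_congr_left fun k _ => ?_
    simp only [Function.comp]
    congr 1
    ring
  simp only [List.map_append, hmid, hshift, List.map_cons, List.map_nil]
  have h0 : pvName N 0 = "working" := by simp [pvName]
  have hf : pvName N (N - 1) = "failed" := by
    simp only [pvName]
    rw [if_neg (by simp; omega), if_pos (by simp)]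
  rw [h0, hf]
  simp

theorem define_state_space_spec_aux (N : Int) :
    define_state_space N = define_state_space_alt N := by
  have hB : define_state_space_alt N
      = (PySem.List.pyRange 0 N 1).map (fun i => (i, pvName N i)) := by
    unfold define_state_space_alt
    have hfun : (fun (d : PySem.Dict Int String) (i : Int) =>
        d.insert i (if i == 0 then "working" else if i == N - 1 then "failed"
          else "partially working (" ++ PySem.Int.toStr i ++ ")"))
        = fun d i => d.insert i (pvName N i) := rfl
    rw [hfun, PySem.Dict.items_foldl_insert_fresh (k := fun i => i) (v := fun i => pvName N i)]
    · simp [PySem.Dict.empty]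
    · intro a _; exact PySem.Dict.contains_empty a
    · simpa using PySem.List.nodup_pyRange_one 0 N
  rcases (by omega : N ≤ 0 ∨ N = 1 ∨ N = 2 ∨ 2 < N) with h | h | h | h
  · unfold define_state_space
    rw [hB, PySem.List.pyRange_one_eq_nil h]
    simp [PySem.Dict.ofList, PySem.Dict.update, PySem.Dict.empty]
  · subst h; decide
  · subst h; decide
  · -- main case N > 2
    simp only [define_state_space]
    rw [if_pos h, hB]
    have hfun : (fun (vs : List String) (i : Int) =>
        PySem.List.insert vs (-1) ("partially working (" ++ PySem.Int.toStr (i + 1) ++ ")"))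
        = fun vs i => PySem.List.insert vs (-1) (pvMid (i + 1)) := rfl
    rw [hfun, show N - 2 = (((N - 2).toNat : Nat) : Int) by omega, foldl_ins]
    rw [vals_eq_map_name N h]
    have hzip : (PySem.List.pyRange 0 N 1).zip ((PySem.List.pyRange 0 N 1).map (pvName N))
        = (PySem.List.pyRange 0 N 1).map (fun i => (i, pvName N i)) := by
      simpa using List.zip_map' (f := @id Int) (g := pvName N) (l := PySem.List.pyRange 0 N 1)
    rw [hzip]
    rw [PySem.Dict.ofList, PySem.Dict.update,
      PySem.Dict.items_foldl_insert_fresh (k := Prod.fst) (v := Prod.snd)]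
    · simp [PySem.Dict.empty]
    · intro a _; exact PySem.Dict.contains_empty _
    · rw [List.map_map,
        show (Prod.fst ∘ fun i : Int => (i, pvName N i)) = fun i => i from rfl,
        List.map_id']
      exact PySem.List.nodup_pyRange_one 0 N

-- ===== VERDICT (by name: the statement is the Claim_ definition above) =====
theorem define_state_space_spec : Claim_equal_define_state_space := by
  intro N _
  exact define_state_space_spec_aux N
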